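-- pv_equiv track=rewrite | github.com/r4576/ReagentPlatform | api/contents/reagent_property_data_Pubchem.py | data_processingMB
-- ===== SOURCE A (Python) =====
-- def data_processingMB(datalist):
--     datanumber_list = []
--     seconddata = []
--     for i, v in enumerate(datalist):
--         if "C" in v:
--             if '(' in v:
--                 datanumber_list.append(i)
--             else:
--                 pass
--         else:
--             datanumber_list.append(i)
--     for i in reversed(datanumber_list) :
--         seconddata.append(datalist.pop(i))
--     return datalist + seconddata
-- ===== SOURCE B (Python) =====
-- def data_processingMB(datalist):
--     # Single pass: partition into kept / selected, return kept + selected reversed.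
--     # (Unlike A, this does not mutate the caller's list; return value is identical.)
--     kept = []
--     selected = []
--     for v in datalist:
--         if "C" in v and "(" not in v:
--             kept.append(v)
--         else:
--             selected.append(v)
--     return kept + list(reversed(selected))
-- ===== Notes on version B (the rewrite author's own statement) =====
-- stated objective: alternative
-- what changed: Replaces the two-pass scheme (collect indices, then repeatedly datalist.pop(i) in reverse) with a single-pass partition into kept/selected lists followed by one reversal; B also leaves the input list unmutated.
import Mathlib
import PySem

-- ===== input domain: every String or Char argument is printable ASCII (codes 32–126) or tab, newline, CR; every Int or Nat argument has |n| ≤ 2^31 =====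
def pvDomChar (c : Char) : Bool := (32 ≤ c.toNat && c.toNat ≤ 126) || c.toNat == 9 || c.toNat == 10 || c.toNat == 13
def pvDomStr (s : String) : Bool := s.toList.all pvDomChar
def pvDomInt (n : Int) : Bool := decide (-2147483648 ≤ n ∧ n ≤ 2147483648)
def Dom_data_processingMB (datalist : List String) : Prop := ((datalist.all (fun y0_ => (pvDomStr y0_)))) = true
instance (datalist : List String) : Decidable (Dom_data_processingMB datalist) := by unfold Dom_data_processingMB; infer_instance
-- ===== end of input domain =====

-- B replaces A's index-collection pass plus repeated pop(i) with a one-pass partition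
-- followed by one reversal (objective: alternative; A also mutates its argument via pop, B does
-- not; the equivalence proved here is about the return value).


-- ===== PORT A =====
-- first loop: collect the indices of entries with no "C", or with "C" and "("
def pvIdxPass (datalist : List String) : List Int :=
  (PySem.List.enumerate datalist).foldl
    (fun acc iv =>
      if PySem.Str.isIn "C" iv.2 then
        (if PySem.Str.isIn "(" iv.2 then acc ++ [iv.1] else acc)
      else acc ++ [iv.1]) []

-- second loop: for i in reversed(datanumber_list): seconddata.append(datalist.pop(i))
-- (datalist.pop(i) never raises here; the none branch keeps the state unchanged, only to be total)
def pvPopPass : List Int → List String × List String → List String × List String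
  | [], st => st
  | i :: rest, (dl, sd) =>
    match PySem.List.pop? dl i with
    | some p => pvPopPass rest (p.2, sd ++ [p.1])
    | none => pvPopPass rest (dl, sd)

def data_processingMB (datalist : List String) : List String :=
  let st := pvPopPass (pvIdxPass datalist).reverse (datalist, [])
  st.1 ++ st.2

-- ===== PORT B =====
def data_processingMB_alt (datalist : List String) : List String :=
  let st := datalist.foldl
    (fun (ks : List String × List String) v =>
      if PySem.Str.isIn "C" v && !PySem.Str.isIn "(" v then (ks.1 ++ [v], ks.2)
      else (ks.1, ks.2 ++ [v])) ([], [])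
  st.1 ++ st.2.reverse

-- ===== PRECONDITION & SPEC =====
def Spec_data_processingMB (datalist : List String) (out : List String) : Prop := out = data_processingMB_alt datalist
instance (datalist : List String) (out : List String) : Decidable (Spec_data_processingMB datalist out) := by unfold Spec_data_processingMB; infer_instance

-- ===== CLAIM (what is proved, stated in full; the proofs are below) =====
def Claim_equal_data_processingMB : Prop := ∀ (datalist : List String), Dom_data_processingMB datalist → Spec_data_processingMB datalist (data_processingMB datalist)

-- ===== LEMMAS AND PROOFS =====

-- "selected" test: entry has no "C", or has both "C" and "("
def pvSel (v : String) : Bool := !(PySem.Str.isIn "C" v && !PySem.Str.isIn "(" v)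

-- indices of the selected entries, counting from s
def pvIdxFrom : List String → Int → List Int
  | [], _ => []
  | x :: t, s => (if pvSel x then [s] else []) ++ pvIdxFrom t (s + 1)

lemma pvIdxPass_go (l : List String) : ∀ (s : Int) (acc : List Int),
    (PySem.List.enumerate l s).foldl
      (fun acc iv =>
        if PySem.Str.isIn "C" iv.2 then
          (if PySem.Str.isIn "(" iv.2 then acc ++ [iv.1] else acc)
        else acc ++ [iv.1]) acc = acc ++ pvIdxFrom l s := by
  induction l with
  | nil => intro s acc; simp [PySem.List.enumerate_nil, pvIdxFrom]
  | cons x t ih =>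
    intro s acc
    rw [PySem.List.enumerate_cons]
    simp only [List.foldl_cons, pvIdxFrom, pvSel]
    rw [ih (s + 1)]
    by_cases hC : PySem.Chars.isIn ['C'] x.toList = true <;>
      by_cases hP : PySem.Chars.isIn ['('] x.toList = true <;>
      simp [hC, hP]

lemma pvIdxPass_eq (l : List String) : pvIdxPass l = pvIdxFrom l 0 := by
  simpa using pvIdxPass_go l 0 []

lemma pvIdxFrom_succ (l : List String) : ∀ s : Int,
    pvIdxFrom l (s + 1) = (pvIdxFrom l s).map (· + 1) := by
  induction l with
  | nil => intro s; simp [pvIdxFrom]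
  | cons x t ih => intro s; by_cases h : pvSel x <;> simp [pvIdxFrom, h, ih]

lemma pvIdxFrom_nonneg (l : List String) : ∀ (s i : Int), i ∈ pvIdxFrom l s → s ≤ i := by
  induction l with
  | nil => intro s i h; simp [pvIdxFrom] at h
  | cons x t ih =>
    intro s i h
    by_cases hx : pvSel x <;> simp [pvIdxFrom, hx] at h
    · rcases h with h | h
      · omega
      · have := ih (s + 1) i h; omega
    · have := ih (s + 1) i h; omega

lemma pvPopPass_append (a b : List Int) : ∀ st,
    pvPopPass (a ++ b) st = pvPopPass b (pvPopPass a st) := by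
  induction a with
  | nil => intro st; simp [pvPopPass]
  | cons i rest ih =>
    intro st
    obtain ⟨dl, sd⟩ := st
    simp only [List.cons_append, pvPopPass]
    cases PySem.List.pop? dl i <;> simp [ih]

lemma pop?_succ {α : Type} (x : α) (dl : List α) (i : Int) (hi : 0 ≤ i) :
    PySem.List.pop? (x :: dl) (i + 1) =
      (PySem.List.pop? dl i).map (fun p => (p.1, x :: p.2)) := by
  simp only [PySem.List.pop?, PySem.List.pyIdx?]
  have h1 : (0 : Int) ≤ i + 1 := by omega
  simp only [hi, h1, if_pos]
  by_cases h2 : i < (dl.length : Int)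
  · have h3 : i + 1 < ((x :: dl).length : Int) := by simp; omega
    have h4 : (i + 1).toNat = i.toNat + 1 := by omega
    simp only [h2, h3, if_pos, Option.bind, h4]
    have h5 : i.toNat < dl.length := by omega
    simp [List.getElem?_eq_getElem h5, List.eraseIdx_cons_succ]
  · have h3 : ¬ (i + 1 < ((x :: dl).length : Int)) := by simp; omega
    simp [h2]

lemma pvPopPass_shift (x : String) : ∀ (M : List Int) (dl sd : List String),
    (∀ i ∈ M, 0 ≤ i) →
    pvPopPass (M.map (· + 1)) (x :: dl, sd) =
      ((pvPopPass M (dl, sd)).1.cons x, (pvPopPass M (dl, sd)).2) := by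
  intro M
  induction M with
  | nil => intro dl sd _; simp [pvPopPass]
  | cons i rest ih =>
    intro dl sd hM
    have hi : 0 ≤ i := hM i (by simp)
    simp only [List.map_cons, pvPopPass, pop?_succ x dl i hi]
    cases h : PySem.List.pop? dl i with
    | none => simp [ih _ _ (fun j hj => hM j (by simp [hj]))]
    | some p => simp [ih _ _ (fun j hj => hM j (by simp [hj]))]

lemma pvPopPass_main : ∀ (l : List String) (acc : List String),
    pvPopPass (pvIdxFrom l 0).reverse (l, acc) =
      (l.filter (fun v => !pvSel v), acc ++ (l.filter pvSel).reverse) := by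
  intro l
  induction l with
  | nil => intro acc; simp [pvIdxFrom, pvPopPass]
  | cons x t ih =>
    intro acc
    have hnn : ∀ i ∈ (pvIdxFrom t 0).reverse, (0 : Int) ≤ i := by
      intro i hi
      exact pvIdxFrom_nonneg t 0 i (List.mem_reverse.mp hi)
    have h1 : pvIdxFrom t 1 = (pvIdxFrom t 0).map (· + 1) := by
      simpa using pvIdxFrom_succ t 0
    by_cases hx : pvSel x
    · have h2 : pvIdxFrom (x :: t) 0 = 0 :: (pvIdxFrom t 0).map (· + 1) := by
        simp [pvIdxFrom, hx, h1]
      rw [h2, List.reverse_cons, ← List.map_reverse, pvPopPass_append,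
          pvPopPass_shift x _ _ _ hnn, ih acc]
      simp [pvPopPass, PySem.List.pop?_zero_cons, hx]
    · have h2 : pvIdxFrom (x :: t) 0 = (pvIdxFrom t 0).map (· + 1) := by
        simp [pvIdxFrom, hx, h1]
      rw [h2, ← List.map_reverse, pvPopPass_shift x _ _ _ hnn, ih acc]
      simp [hx]

lemma alt_fold (l : List String) : ∀ (k s : List String),
    l.foldl
      (fun (ks : List String × List String) v =>
        if PySem.Str.isIn "C" v && !PySem.Str.isIn "(" v then (ks.1 ++ [v], ks.2)
        else (ks.1, ks.2 ++ [v])) (k, s)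
      = (k ++ l.filter (fun v => !pvSel v), s ++ l.filter pvSel) := by
  induction l with
  | nil => intro k s; simp
  | cons x t ih =>
    intro k s
    have hc : (PySem.Str.isIn "C" x && !PySem.Str.isIn "(" x) = !pvSel x :=
      (Bool.not_not _).symm
    simp only [List.foldl_cons, hc]
    cases hx : pvSel x
    · rw [if_pos (by decide), ih]
      simp [hx]
    · rw [if_neg (by decide), ih]
      simp [hx]

-- ===== VERDICT (by name: the statement is the Claim_ definition above) =====
theorem data_processingMB_spec : Claim_equal_data_processingMB := by
  intro datalist _
  unfold Spec_data_processingMB data_processingMB data_processingMB_alt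
  rw [pvIdxPass_eq, pvPopPass_main datalist [], alt_fold datalist [] []]
  simp
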